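-- pv_equiv track=rewrite | github.com/sofialaballeja21/LenguajeYParadigma | numerosEnteros.py | es_numero_entero
-- ===== SOURCE A (Python) =====
-- def es_numero_entero(lexema):
--     Q0 = 0  # Estado inicial
--     Q = [0, 1, 2, 3]  # Conjunto de estados
--     F = [2]  # Estado de aceptación (números enteros válidos)
--
--     estado_actual = Q0
--     indice = 0
--
--     # Definir alfabeto SIGMA
--     SIGMA = {
--         "+": 0,  # Signo positivo
--         "-": 1,  # Signo negativo
--         "d": 2,  # Dígitos
--         "OTRO": 3  # Caracteres inválidos
--     }
--
--     # Tabla de transiciones DELTA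
--     DELTA = [
--         [1, 1, 2, 3],  # Estado 0 (inicial)
--         [3, 3, 2, 3],  # Estado 1 (después de + o -)
--         [3, 3, 2, 3],  # Estado 2 (después de un dígito)
--         [3, 3, 3, 3],  # Estado 3 (estado muerto)
--     ]
--
--     # Función para mapear caracteres a símbolos del alfabeto
--     def simbolo(caracter):
--         if caracter == "+":
--             return SIGMA["+"]
--         if caracter == "-":
--             return SIGMA["-"]
--         if caracter.isdigit():
--             return SIGMA["d"]
--         return SIGMA["OTRO"]
--
--     # Procesar cada carácter del lexema
--     while indice < len(lexema) and estado_actual != 3:  # Estado muerto es 3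
--         estado_actual = DELTA[estado_actual][simbolo(lexema[indice])]
--         indice += 1
--
--     # Verificar si el estado final es de aceptación
--     return estado_actual in F
-- ===== SOURCE B (Python) =====
-- def es_numero_entero(lexema):
--     rest = lexema[1:] if lexema[:1] in ("+", "-") else lexema
--     return bool(rest) and all(c.isdigit() for c in rest)
-- ===== Notes on version B (the rewrite author's own statement) =====
-- stated objective: simpler
-- what changed: Replaces the explicit DFA (state set, SIGMA map, DELTA transition table, while-loop) with a direct check: drop one leading sign, then require a non-empty all-digit remainder.
import Mathlib
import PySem

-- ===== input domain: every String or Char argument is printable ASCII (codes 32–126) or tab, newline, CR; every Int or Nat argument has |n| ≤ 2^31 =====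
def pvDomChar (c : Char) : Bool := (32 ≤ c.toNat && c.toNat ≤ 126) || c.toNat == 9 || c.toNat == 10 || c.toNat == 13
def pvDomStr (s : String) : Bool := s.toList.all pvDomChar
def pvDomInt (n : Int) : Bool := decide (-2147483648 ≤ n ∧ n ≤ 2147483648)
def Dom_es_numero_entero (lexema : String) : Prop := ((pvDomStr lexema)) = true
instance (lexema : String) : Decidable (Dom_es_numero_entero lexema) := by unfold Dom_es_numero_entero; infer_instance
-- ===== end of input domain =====

-- B replaces A's explicit DFA (states, SIGMA, DELTA table, while-loop) with a direct
-- check: drop one leading sign, then require a non-empty all-digit remainder. Same cost.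

-- ===== PORT A =====
-- DELTA transition table, row-indexed by state, column-indexed by symbol (as in A)
def pvDELTA : List (List Nat) :=
  [[1, 1, 2, 3],
   [3, 3, 2, 3],
   [3, 3, 2, 3],
   [3, 3, 3, 3]]

-- A's simbolo(): map a character to its SIGMA code
def pvSimbolo (c : Char) : Nat :=
  if c = '+' then 0
  else if c = '-' then 1
  else if PySem.Chars.isdigit c then 2
  else 3

-- A's while-loop: advance through the characters while the state is not the dead state 3
def pvDfaLoop (estado : Nat) (cs : List Char) : Nat :=
  match cs with
  | [] => estado
  | c :: rest =>
    if estado ≠ 3 then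
      pvDfaLoop ((pvDELTA.getD estado []).getD (pvSimbolo c) 3) rest
    else estado

def es_numero_entero (lexema : String) : Bool :=
  decide (pvDfaLoop 0 lexema.toList ∈ [2])

-- ===== PORT B =====
def es_numero_entero_alt (lexema : String) : Bool :=
  let rest :=
    match lexema.toList with
    | c :: t => if c = '+' ∨ c = '-' then t else c :: t
    | [] => []
  rest ≠ [] && rest.all PySem.Chars.isdigit

-- ===== PRECONDITION & SPEC =====
def Spec_es_numero_entero (lexema : String) (out : Bool) : Prop := out = es_numero_entero_alt lexema
instance (lexema : String) (out : Bool) : Decidable (Spec_es_numero_entero lexema out) := by unfold Spec_es_numero_entero; infer_instance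

-- ===== CLAIM (what is proved, stated in full; the proofs are below) =====
def Claim_equal_es_numero_entero : Prop := ∀ (lexema : String), Dom_es_numero_entero lexema → Spec_es_numero_entero lexema (es_numero_entero lexema)

-- ===== LEMMAS AND PROOFS =====
-- The dead state 3 absorbs.
theorem pvDfaLoop_dead (cs : List Char) : pvDfaLoop 3 cs = 3 := by
  cases cs <;> simp [pvDfaLoop]

-- From the digit state 2, the loop stays at 2 exactly while it reads digits, else dies at 3.
theorem pvDfaLoop_from2 (cs : List Char) :
    pvDfaLoop 2 cs = if cs.all PySem.Chars.isdigit then 2 else 3 := by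
  induction cs with
  | nil => simp [pvDfaLoop]
  | cons c t ih =>
    simp only [pvDfaLoop, List.all_cons]
    by_cases hd : PySem.Chars.isdigit c = true
    · have h1 : c ≠ '+' := by rintro rfl; simp [PySem.Chars.isdigit] at hd
      have h2 : c ≠ '-' := by rintro rfl; simp [PySem.Chars.isdigit] at hd
      simp [pvSimbolo, pvDELTA, h1, h2, hd, ih]
    · by_cases h1 : c = '+'
      · subst h1; simp [pvSimbolo, pvDELTA, pvDfaLoop_dead, hd]
      · by_cases h2 : c = '-'
        · subst h2; simp [pvSimbolo, pvDELTA, pvDfaLoop_dead, hd]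
        · simp [pvSimbolo, pvDELTA, h1, h2, hd, pvDfaLoop_dead]

-- ===== VERDICT (by name: the statement is the Claim_ definition above) =====
theorem es_numero_entero_spec : Claim_equal_es_numero_entero := by
  intro lexema _
  unfold Spec_es_numero_entero es_numero_entero es_numero_entero_alt
  cases h : lexema.toList with
  | nil => simp [pvDfaLoop]
  | cons c t =>
    by_cases hsign : c = '+' ∨ c = '-'
    · -- first char is a sign: state goes to 1; from 1 one digit reaches 2, else dies
      rcases hsign with rfl | rfl <;>
      · cases t with
        | nil => simp [pvDfaLoop, pvSimbolo, pvDELTA]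
        | cons d u =>
          by_cases hd : PySem.Chars.isdigit d = true
          · have h1 : d ≠ '+' := by rintro rfl; simp [PySem.Chars.isdigit] at hd
            have h2 : d ≠ '-' := by rintro rfl; simp [PySem.Chars.isdigit] at hd
            by_cases hu : u.all PySem.Chars.isdigit <;>
              simp [pvDfaLoop, pvSimbolo, pvDELTA, h1, h2, hd, pvDfaLoop_from2, hu]
          · have hloop : pvDfaLoop 1 (d :: u) = 3 := by
              by_cases h1 : d = '+'
              · subst h1; simp [pvDfaLoop, pvSimbolo, pvDELTA, pvDfaLoop_dead]
              · by_cases h2 : d = '-'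
                · subst h2; simp [pvDfaLoop, pvSimbolo, pvDELTA, pvDfaLoop_dead]
                · simp [pvDfaLoop, pvSimbolo, pvDELTA, h1, h2, hd, pvDfaLoop_dead]
            rw [pvDfaLoop]; simp [pvSimbolo, pvDELTA, hloop, hd]
    · -- no sign: behaves like starting the digit test directly
      rw [not_or] at hsign
      obtain ⟨h1, h2⟩ := hsign
      by_cases hd : PySem.Chars.isdigit c = true
      · by_cases hu : t.all PySem.Chars.isdigit <;>
          simp [pvDfaLoop, pvSimbolo, pvDELTA, h1, h2, hd, pvDfaLoop_from2, hu]
      · simp [pvDfaLoop, pvSimbolo, pvDELTA, h1, h2, hd, pvDfaLoop_dead]
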